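-- pv_equiv track=rewrite | github.com/Fondamenti18/fondamenti-di-programmazione | students/1801156/homework03/program02.py | camminare_indietro
-- ===== SOURCE A (Python) =====
-- def colorare_cella(img, w, h, c = (0, 255, 0)):
--     '''ciclo per colorare una cella.'''
--     for h1 in range(h, h+40):
--         for w1 in range(w, w+40):
--             img[h1][w1] = c
--
-- def camminare_indietro(img, w, h, sequenza):
--     '''camminare indietro.'''
--     if w >= 0:
--         if img[h][w] != (255, 0, 0) and img[h][w] != (0, 255, 0):
--             colorare_cella(img, w, h)
--             sequenza += '2'
--             return camminare_indietro(img, w-40, h, sequenza)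
--         else:
--             return w, h, sequenza
--     else:
--         return w, h, sequenza
-- ===== SOURCE B (Python) =====
-- def colorare_cella(img, w, h, c = (0, 255, 0)):
--     '''ciclo per colorare una cella.'''
--     for h1 in range(h, h+40):
--         for w1 in range(w, w+40):
--             img[h1][w1] = c
--
-- def camminare_indietro(img, w, h, sequenza):
--     '''camminare indietro: first find how many 40px steps fit, then color them.'''
--     stop = ((255, 0, 0), (0, 255, 0))
--     steps = 0
--     if w >= 0:
--         total = w // 40 + 1   # positions w, w-40, ..., down to the last one >= 0
--         steps = next((k for k in range(total) if img[h][w - 40 * k] in stop), total)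
--         for k in range(steps):
--             colorare_cella(img, w - 40 * k, h)
--     return w - 40 * steps, h, sequenza + '2' * steps
-- ===== Notes on version B (the rewrite author's own statement) =====
-- stated objective: alternative
-- what changed: A walks cell-by-cell with tail recursion, re-reading and re-concatenating the sequence at every step; B first computes the step count (a bounded scan for the first stop cell among the w//40+1 candidate columns), then does the coloring pass and builds the final position and the '2'-run string once.
import Mathlib
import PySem

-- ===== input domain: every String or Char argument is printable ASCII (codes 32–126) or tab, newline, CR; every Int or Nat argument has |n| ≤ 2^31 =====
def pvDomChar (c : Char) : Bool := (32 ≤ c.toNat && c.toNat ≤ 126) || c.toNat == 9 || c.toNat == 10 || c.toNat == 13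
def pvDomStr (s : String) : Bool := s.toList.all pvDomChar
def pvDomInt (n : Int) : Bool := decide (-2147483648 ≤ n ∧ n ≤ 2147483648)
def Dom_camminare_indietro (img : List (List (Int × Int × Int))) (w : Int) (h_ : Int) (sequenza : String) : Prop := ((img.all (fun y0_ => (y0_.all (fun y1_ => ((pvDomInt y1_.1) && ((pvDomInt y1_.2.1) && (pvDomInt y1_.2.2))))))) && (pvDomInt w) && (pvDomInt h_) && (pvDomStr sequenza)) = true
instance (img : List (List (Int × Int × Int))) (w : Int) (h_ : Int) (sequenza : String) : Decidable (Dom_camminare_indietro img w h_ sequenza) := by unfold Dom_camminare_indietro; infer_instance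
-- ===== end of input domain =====

-- B re-implements the walk as "count the steps first, then color and build the result once"
-- instead of A's per-step tail recursion (objective: alternative). Both Pythons mutate img
-- identically via colorare_cella; the equivalence proved here is about the return value.


-- ===== PORT A =====

-- img[h1][w1] = c  (Python's in-place assignment; identity where Python would raise, outside Pre_)
def pvSet2 (im : List (List (Int × Int × Int))) (h1 w1 : Int) (c : Int × Int × Int) : List (List (Int × Int × Int)) :=
  match PySem.List.pyGet? im h1 with
  | some row => PySem.List.pySetD im h1 (PySem.List.pySetD row w1 c)
  | none => im

-- colorare_cella(img, w, h): the two nested for-loops over range(h,h+40) × range(w,w+40)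
def pvColoraA (img : List (List (Int × Int × Int))) (w : Int) (h_ : Int) : List (List (Int × Int × Int)) :=
  (PySem.List.pyRange h_ (h_ + 40) 1).foldl (fun im h1 =>
    (PySem.List.pyRange w (w + 40) 1).foldl (fun im2 w1 => pvSet2 im2 h1 w1 (0, 255, 0)) im) img

-- img[h][w]  (none = IndexError, excluded by Pre_)
def pvCell (img : List (List (Int × Int × Int))) (h_ x : Int) : Option (Int × Int × Int) :=
  (PySem.List.pyGet? img h_).bind (fun row => PySem.List.pyGet? row x)

def camminare_indietro (img : List (List (Int × Int × Int))) (w : Int) (h_ : Int) (sequenza : String) : Int × Int × String :=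
  if 0 ≤ w then
    match pvCell img h_ w with
    | some c =>
      if c ≠ (255, 0, 0) ∧ c ≠ (0, 255, 0) then
        camminare_indietro (pvColoraA img w h_) (w - 40) h_ (sequenza ++ "2")
      else (w, h_, sequenza)
    | none => (w, h_, sequenza)   -- Python raises IndexError here; outside Pre_
  else (w, h_, sequenza)
termination_by (w + 40).toNat
decreasing_by omega

-- ===== PORT B =====

-- Source B's membership test 'img[h][x] in stop'; true on IndexError cells (outside Pre_)
def pvStopB (img : List (List (Int × Int × Int))) (h_ x : Int) : Bool :=
  match PySem.List.pyGet? img h_ with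
  | none => true
  | some row =>
    match PySem.List.pyGet? row x with
    | none => true
    | some c => c == (255, 0, 0) || c == (0, 255, 0)

-- Source B's copy of colorare_cella (same module helper)
def pvColoraB (img : List (List (Int × Int × Int))) (w : Int) (h_ : Int) : List (List (Int × Int × Int)) :=
  (PySem.List.pyRange h_ (h_ + 40) 1).foldl (fun im h1 =>
    (PySem.List.pyRange w (w + 40) 1).foldl (fun im2 w1 => pvSet2 im2 h1 w1 (0, 255, 0)) im) img

def camminare_indietro_alt (img : List (List (Int × Int × Int))) (w : Int) (h_ : Int) (sequenza : String) : Int × Int × String :=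
  let steps : Int :=
    if 0 ≤ w then
      let total := PySem.Int.floordiv w 40 + 1
      match (PySem.List.pyRange 0 total 1).find? (fun k => pvStopB img h_ (w - 40 * k)) with
      | some k => k
      | none => total
    else 0
  -- the coloring pass mutates img in Python; its result does not feed the return value
  let _img' := (PySem.List.pyRange 0 steps 1).foldl (fun im k => pvColoraB im (w - 40 * k) h_) img
  (w - 40 * steps, h_, sequenza ++ String.ofList (List.replicate steps.toNat '2'))

-- ===== PRECONDITION & SPEC =====
-- Pre_ = exactly the inputs on which Python A returns (everywhere else it raises IndexError):
-- either the walk never indexes (w < 0), or the very first cell read is a stop colour, or the 40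
-- rows h..h+39 are all indexable (wraparound included) and at least w+40 long, so that every read
-- and every colorare_cella write of the whole walk lands in range.
def Pre_camminare_indietro (img : List (List (Int × Int × Int))) (w : Int) (h_ : Int) (sequenza : String) : Prop :=
  w < 0
  ∨ pvCell img h_ w = some (255, 0, 0)
  ∨ pvCell img h_ w = some (0, 255, 0)
  ∨ ((PySem.List.pyRange h_ (h_ + 40) 1).all (fun h1 =>
        decide (-(img.length : Int) ≤ h1 ∧ h1 < (img.length : Int) ∧
                w + 40 ≤ ((PySem.List.pyGetD img h1 []).length : Int)))) = true
instance (img : List (List (Int × Int × Int))) (w : Int) (h_ : Int) (sequenza : String) : Decidable (Pre_camminare_indietro img w h_ sequenza) := by unfold Pre_camminare_indietro; infer_instance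

def pvWitness_camminare_indietro : (List (List (Int × Int × Int))) × Int × Int × String := ([[(255, 0, 0)]], 0, 0, "")

def Spec_camminare_indietro (img : List (List (Int × Int × Int))) (w : Int) (h_ : Int) (sequenza : String) (out : Int × Int × String) : Prop := out = camminare_indietro_alt img w h_ sequenza
instance (img : List (List (Int × Int × Int))) (w : Int) (h_ : Int) (sequenza : String) (out : Int × Int × String) : Decidable (Spec_camminare_indietro img w h_ sequenza out) := by unfold Spec_camminare_indietro; infer_instance

-- ===== CLAIM (what is proved, stated in full; the proofs are below) =====
def Claim_equal_camminare_indietro : Prop := ∀ (img : List (List (Int × Int × Int))) (w : Int) (h_ : Int) (sequenza : String), Dom_camminare_indietro img w h_ sequenza → Pre_camminare_indietro img w h_ sequenza → Spec_camminare_indietro img w h_ sequenza (camminare_indietro img w h_ sequenza)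

-- ===== LEMMAS AND PROOFS =====
-- (The two ports in fact agree on every input — the proof below does not need Pre_; Pre_ is there
-- because Python A raises outside it, so the behavioural comparison is only meaningful inside.)

lemma pyIdx?_lt {n : Nat} {i : Int} {s : Nat} (h : PySem.List.pyIdx? n i = some s) : s < n := by
  unfold PySem.List.pyIdx? at h
  split_ifs at h <;> injection h with h <;> omega

lemma pyGet?_set_row {α : Type} (l : List α) (w1 x : Int) (v : α)
    (hx : 0 ≤ x) (hw1 : 0 ≤ w1) (hne : x ≠ w1) :
    PySem.List.pyGet? (PySem.List.pySetD l w1 v) x = PySem.List.pyGet? l x := by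
  rw [PySem.List.pySetD_of_nonneg l v hw1, PySem.List.pyGet?_of_nonneg _ hx,
      PySem.List.pyGet?_of_nonneg _ hx]
  rw [List.getElem?_set_ne (by omega)]

-- a single cell assignment does not change a read at a column other than the written one
lemma pvCell_pvSet2 (im : List (List (Int × Int × Int))) (h1 w1 h' x : Int)
    (c : Int × Int × Int) (hx : 0 ≤ x) (hw1 : 0 ≤ w1) (hne : x ≠ w1) :
    pvCell (pvSet2 im h1 w1 c) h' x = pvCell im h' x := by
  unfold pvSet2
  cases hg : PySem.List.pyGet? im h1 with
  | none => rfl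
  | some row =>
    rw [PySem.List.pyGet?] at hg
    cases ht : PySem.List.pyIdx? im.length h1 with
    | none => simp [ht] at hg
    | some t =>
      rw [ht] at hg
      simp only [Option.bind_some] at hg
      have hset : PySem.List.pySetD im h1 (PySem.List.pySetD row w1 c)
          = im.set t (PySem.List.pySetD row w1 c) := by
        simp [PySem.List.pySetD, PySem.List.pySet?, ht]
      change pvCell (PySem.List.pySetD im h1 (PySem.List.pySetD row w1 c)) h' x = pvCell im h' x
      rw [hset]
      unfold pvCell
      rw [PySem.List.pyGet?, PySem.List.pyGet?]
      rw [List.length_set]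
      cases hi : PySem.List.pyIdx? im.length h' with
      | none => rfl
      | some s =>
        simp only [Option.bind_some]
        by_cases hst : s = t
        · subst hst
          have hlt : s < im.length := pyIdx?_lt hi
          rw [List.getElem?_set_self (by omega), hg]
          simp only [Option.bind_some]
          exact pyGet?_set_row row w1 x c hx hw1 hne
        · rw [List.getElem?_set_ne (by omega)]

lemma pvCell_inner_fold (l : List Int) (h1 h' x : Int) (hx : 0 ≤ x)
    (hl : ∀ w1 ∈ l, 0 ≤ w1 ∧ x ≠ w1) :
    ∀ im, pvCell (l.foldl (fun im2 w1 => pvSet2 im2 h1 w1 (0, 255, 0)) im) h' x = pvCell im h' x := by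
  induction l with
  | nil => intro im; rfl
  | cons a t ih =>
    intro im
    rw [List.foldl_cons]
    rw [ih (fun w1 hw => hl w1 (by simp [hw]))]
    exact pvCell_pvSet2 im h1 a h' x _ hx (hl a (by simp)).1 (hl a (by simp)).2

lemma pvCell_outer_fold (L : List Int) (w h' x : Int) (hx : 0 ≤ x) (hxw : x < w) :
    ∀ im, pvCell (L.foldl (fun im h1 =>
      (PySem.List.pyRange w (w + 40) 1).foldl (fun im2 w1 => pvSet2 im2 h1 w1 (0, 255, 0)) im) im) h' x
      = pvCell im h' x := by
  induction L with
  | nil => intro im; rfl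
  | cons a t ih =>
    intro im
    rw [List.foldl_cons, ih]
    refine pvCell_inner_fold _ a h' x hx (fun w1 hw => ?_) im
    rw [PySem.List.mem_pyRange_one] at hw
    omega

-- coloring the cell at column w never changes a read at a column left of it
lemma pvCell_colora (img : List (List (Int × Int × Int))) (w h_ h' x : Int)
    (hx : 0 ≤ x) (hxw : x < w) :
    pvCell (pvColoraA img w h_) h' x = pvCell img h' x :=
  pvCell_outer_fold _ w h' x hx hxw img

lemma pvStopB_eq_cell (img : List (List (Int × Int × Int))) (h_ x : Int) :
    pvStopB img h_ x = (match pvCell img h_ x with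
      | some c => c == (255, 0, 0) || c == (0, 255, 0)
      | none => true) := by
  unfold pvStopB pvCell
  cases PySem.List.pyGet? img h_ with
  | none => rfl
  | some row => cases hx : PySem.List.pyGet? row x <;> simp [hx]

lemma seq_two_rep (seq : String) (n : Nat) :
    (seq ++ "2") ++ String.ofList (List.replicate n '2') = seq ++ String.ofList (List.replicate (n+1) '2') := by
  rw [List.replicate_succ, show ('2' :: List.replicate n '2') = ['2'] ++ List.replicate n '2' from rfl,
     String.ofList_append, show String.ofList ['2'] = "2" from rfl, ← String.append_assoc]

lemma find?_congr_mem {α : Type} (p q : α → Bool) (l : List α) (h : ∀ a ∈ l, p a = q a) :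
    l.find? p = l.find? q := by
  induction l with
  | nil => rfl
  | cons a t ih =>
    simp only [List.find?]
    rw [h a (by simp)]
    cases q a
    · exact ih (fun b hb => h b (by simp [hb]))
    · rfl

-- one white step of A, seen from B's side: the step count grows by one
lemma step_alt (img : List (List (Int × Int × Int))) (w h_ : Int) (seq : String)
    (hw0 : 0 ≤ w) (hstop : pvStopB img h_ w = false) :
    camminare_indietro_alt (pvColoraA img w h_) (w - 40) h_ (seq ++ "2") = camminare_indietro_alt img w h_ seq := by
  have hq : PySem.Int.floordiv w 40 * 40 ≤ w ∧ w < (PySem.Int.floordiv w 40 + 1) * 40 :=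
    (PySem.Int.floordiv_eq_iff_of_pos (by norm_num)).mp rfl
  set q := PySem.Int.floordiv w 40 with hqdef
  have hq0 : 0 ≤ q := by nlinarith [hq.1, hq.2]
  by_cases h40 : w < 40
  · -- q = 0: the left walk is already off the grid, the right walk scans only k = 0
    have hq1 : q = 0 := by nlinarith [hq.1, hq.2]
    simp only [camminare_indietro_alt]
    rw [if_neg (by omega), if_pos hw0, ← hqdef, hq1]
    rw [PySem.List.pyRange_one_singleton 0]
    rw [List.find?_cons_of_neg (by rw [show w - 40 * (0:Int) = w by ring, hstop]; exact Bool.false_ne_true),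
        List.find?_nil]
    simp only [Prod.mk.injEq]
    refine ⟨by ring, trivial, ?_⟩
    rw [show ((0:Int)).toNat = 0 from rfl, show ((0:Int)+1).toNat = 0+1 from rfl]
    exact seq_two_rep seq 0
  · -- 40 ≤ w: peel k = 0 off B's scan and shift the rest by one column
    have hq1 : 1 ≤ q := by nlinarith [hq.1, hq.2]
    have hfd : PySem.Int.floordiv (w - 40) 40 = q - 1 := by
      rw [PySem.Int.floordiv_eq_iff_of_pos (by norm_num)]
      constructor <;> nlinarith [hq.1, hq.2]
    simp only [camminare_indietro_alt]
    rw [if_pos (show (0:Int) ≤ w - 40 by omega), if_pos hw0, ← hqdef, hfd]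
    rw [show q - 1 + 1 = q from by ring]
    rw [PySem.List.pyRange_one_cons (show (0:Int) < q + 1 by omega)]
    rw [List.find?_cons_of_neg (by rw [show w - 40 * (0:Int) = w by ring, hstop]; exact Bool.false_ne_true)]
    rw [PySem.List.pyRange_one (0+1) (q+1), PySem.List.pyRange_one 0 q]
    rw [show (q + 1 - (0+1)).toNat = q.toNat from by omega, show (q - 0).toNat = q.toNat from by omega]
    rw [List.find?_map, List.find?_map]
    rw [find?_congr_mem
      ((fun k => pvStopB (pvColoraA img w h_) h_ (w - 40 - 40 * k)) ∘ fun (k : Nat) => (0:Int) + (k:Int))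
      ((fun k => pvStopB img h_ (w - 40 * k)) ∘ fun (k : Nat) => (0:Int) + 1 + (k:Int))
      (List.range q.toNat)
      (by
        intro k hk
        rw [List.mem_range] at hk
        have hkq : (k : Int) < q := by omega
        simp only [Function.comp]
        rw [show w - 40 - 40 * ((0:Int) + k) = w - 40 * ((0:Int) + 1 + k) by ring]
        rw [pvStopB_eq_cell, pvStopB_eq_cell]
        rw [pvCell_colora img w h_ h_ (w - 40 * ((0:Int) + 1 + k)) (by nlinarith [hq.1]) (by omega)])]
    cases hf : List.find? ((fun k => pvStopB img h_ (w - 40 * k)) ∘ fun (k : Nat) => (0:Int) + 1 + (k:Int)) (List.range q.toNat) with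
    | none =>
      simp only [Option.map_none, Prod.mk.injEq]
      refine ⟨by ring, trivial, ?_⟩
      rw [show (q+1).toNat = q.toNat + 1 from by omega]
      exact seq_two_rep seq q.toNat
    | some k =>
      simp only [Option.map_some, Prod.mk.injEq]
      refine ⟨by ring, trivial, ?_⟩
      rw [show ((0:Int) + ↑k).toNat = k from by omega, show ((0:Int) + 1 + ↑k).toNat = k + 1 from by omega]
      exact seq_two_rep seq k

lemma alt_neg (img : List (List (Int × Int × Int))) (w h_ : Int) (seq : String) (hw : ¬ 0 ≤ w) :
    camminare_indietro_alt img w h_ seq = (w, h_, seq) := by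
  simp only [camminare_indietro_alt, if_neg hw]
  norm_num

lemma alt_stop (img : List (List (Int × Int × Int))) (w h_ : Int) (seq : String)
    (hw : 0 ≤ w) (hstop : pvStopB img h_ w = true) :
    camminare_indietro_alt img w h_ seq = (w, h_, seq) := by
  simp only [camminare_indietro_alt, if_pos hw]
  have hq0 : 0 ≤ PySem.Int.floordiv w 40 := by
    have := (PySem.Int.floordiv_eq_iff_of_pos (b := 40) (a := w)
      (q := PySem.Int.floordiv w 40) (by norm_num)).mp rfl
    nlinarith [this.1, this.2]
  rw [PySem.List.pyRange_one_cons (show (0:Int) < PySem.Int.floordiv w 40 + 1 by omega)]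
  rw [List.find?_cons_of_pos (by rw [show w - 40 * (0:Int) = w by ring, hstop])]
  norm_num

lemma main_equiv (h_ : Int) : ∀ (n : Nat) (w : Int), (w + 40).toNat ≤ n →
    ∀ (img : List (List (Int × Int × Int))) (seq : String),
    camminare_indietro img w h_ seq = camminare_indietro_alt img w h_ seq := by
  intro n
  induction n with
  | zero =>
    intro w hw img seq
    have hneg : ¬ 0 ≤ w := by omega
    rw [camminare_indietro, if_neg hneg, alt_neg img w h_ seq hneg]
  | succ n ih =>
    intro w hw img seq
    by_cases hw0 : 0 ≤ w
    · by_cases hstop : pvStopB img h_ w = true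
      · rw [alt_stop img w h_ seq hw0 hstop, camminare_indietro, if_pos hw0]
        rw [pvStopB_eq_cell] at hstop
        cases hc : pvCell img h_ w with
        | none => rfl
        | some c =>
          rw [hc] at hstop
          show (if c ≠ (255, 0, 0) ∧ c ≠ (0, 255, 0) then camminare_indietro (pvColoraA img w h_) (w - 40) h_ (seq ++ "2") else (w, h_, seq)) = (w, h_, seq)
          rw [if_neg]
          intro hcon
          rcases hcon with ⟨h1, h2⟩
          rcases Bool.or_eq_true_iff.mp hstop with h | h
          · exact h1 (by simpa using h)
          · exact h2 (by simpa using h)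
      · have hstop' : pvStopB img h_ w = false := by
          cases h : pvStopB img h_ w
          · rfl
          · exact absurd h hstop
        rw [camminare_indietro, if_pos hw0]
        have hcell : ∃ c, pvCell img h_ w = some c ∧ c ≠ (255,0,0) ∧ c ≠ (0,255,0) := by
          rw [pvStopB_eq_cell] at hstop'
          cases hc : pvCell img h_ w with
          | none => rw [hc] at hstop'; simp at hstop'
          | some c =>
            rw [hc] at hstop'
            simp only [Bool.or_eq_false_iff] at hstop'
            exact ⟨c, rfl, by simpa using hstop'.1, by simpa using hstop'.2⟩
        rcases hcell with ⟨c, hc, hc1, hc2⟩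
        rw [hc]
        show (if c ≠ (255, 0, 0) ∧ c ≠ (0, 255, 0) then camminare_indietro (pvColoraA img w h_) (w - 40) h_ (seq ++ "2") else (w, h_, seq)) = camminare_indietro_alt img w h_ seq
        rw [if_pos (And.intro hc1 hc2)]
        rw [ih (w - 40) (by omega) (pvColoraA img w h_) (seq ++ "2")]
        exact step_alt img w h_ seq hw0 hstop'
    · rw [camminare_indietro, if_neg hw0, alt_neg img w h_ seq hw0]

-- ===== VERDICT (by name: the statement is the Claim_ definition above) =====
theorem camminare_indietro_spec : Claim_equal_camminare_indietro := by
  intro img w h_ seq _ _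
  unfold Spec_camminare_indietro
  exact main_equiv h_ (w + 40).toNat w le_rfl img seq
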